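-- pv_equiv track=rewrite | github.com/gtystahl/2048H | 2048/PlayerAI_UG.py | H6
-- ===== SOURCE A (Python) =====
-- def H6(puzzle):
--     # Tries to get the same stuff next to each other
--
--     # This is the return var
--     val = 0
--
--     # Goes through each item in the puzzle
--     for i in range(len(puzzle)):
--         # Gets the cell of the puzzle
--         cell = puzzle[i]
--
--         # This is the possible neighbor location differences
--         lst = [1, -1, 4, -4]
--
--         # For each number in the above list
--         for num in lst:
--             # Try to get that new location
--             try:
--                 # Gets the new location
--                 loc = i + num
--
--                 # Checks to make sure the item exists
--                 check = (i % 4) + num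
--
--                 # If the item does exist
--                 if check >= 0 and check < 4:
--                     # Gets the second cell
--                     cell2 = puzzle[loc]
--
--                     # checks to see if they are equal
--                     if cell[0] == cell2[0]:
--                         # If they are add to the total val
--                         val += cell[0]
--             except:
--                 val += 0
--     # returns the vals that are the same
--     return val
-- ===== SOURCE B (Python) =====
-- def H6(puzzle):
--     # Sum 2*value for each horizontally-adjacent equal pair, scanning rows of width 4.
--     val = 0
--     for j in range(0, len(puzzle), 4):
--         row = puzzle[j:j + 4]
--         for a, b in zip(row, row[1:]):
--             if a and b and a[0] == b[0]:
--                 val += 2 * a[0]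
--     return val
-- ===== Notes on version B (the rewrite author's own statement) =====
-- stated objective: simpler
-- what changed: B drops A's per-cell offset list [1,-1,4,-4], the dead vertical +-4 checks and the try/except, and instead scans each width-4 row once, adding 2*value for every adjacent equal pair (A counts each pair from both sides).
import Mathlib
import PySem

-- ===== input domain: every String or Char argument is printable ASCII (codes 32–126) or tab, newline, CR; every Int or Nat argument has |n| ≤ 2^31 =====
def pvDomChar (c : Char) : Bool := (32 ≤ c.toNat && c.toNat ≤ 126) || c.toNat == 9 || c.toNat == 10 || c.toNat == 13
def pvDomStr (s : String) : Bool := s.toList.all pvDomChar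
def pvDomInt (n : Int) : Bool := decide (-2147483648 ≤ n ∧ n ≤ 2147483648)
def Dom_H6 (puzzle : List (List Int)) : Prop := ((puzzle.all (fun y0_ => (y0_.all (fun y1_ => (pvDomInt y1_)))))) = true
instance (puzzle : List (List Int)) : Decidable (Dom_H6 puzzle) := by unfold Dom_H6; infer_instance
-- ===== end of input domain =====

-- B replaces A's offset list, dead vertical (±4) checks and try/except with a plain scan of
-- adjacent pairs inside each width-4 row, adding 2*value per matched pair (objective: simpler).

-- ===== PORT A =====
-- body of A's try-block for one offset `num`: any failed indexing returns 0 (the except branch)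
def tryA (puzzle : List (List Int)) (cell : List Int) (i num : Int) : Int :=
  let loc := i + num
  let check := PySem.Int.mod i 4 + num
  if 0 ≤ check ∧ check < 4 then
    match PySem.List.pyGet? puzzle loc with
    | none => 0                                   -- IndexError on puzzle[loc]
    | some cell2 =>
      match PySem.List.pyGet? cell 0, PySem.List.pyGet? cell2 0 with
      | some c, some c2 => if c = c2 then c else 0
      | _, _ => 0                                 -- IndexError on cell[0] / cell2[0]
  else 0

def H6 (puzzle : List (List Int)) : Int :=
  (PySem.List.pyRange 0 (puzzle.length : Int) 1).foldl
    (fun val i =>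
      let cell := PySem.List.pyGetD puzzle i []    -- i ∈ range(len(puzzle)) is always in range
      [(1 : Int), -1, 4, -4].foldl (fun v num => v + tryA puzzle cell i num) val)
    0

-- ===== PORT B =====
def H6_alt (puzzle : List (List Int)) : Int :=
  (PySem.List.pyRange 0 (puzzle.length : Int) 4).foldl
    (fun val j =>
      let row := PySem.List.slice puzzle (some j) (some (j + 4))
      (row.zip row.tail).foldl
        (fun v p =>
          match p with
          | (x :: _, y :: _) => if x = y then v + 2 * x else v
          | _ => v)
        val)
    0

-- ===== PRECONDITION & SPEC =====
def Spec_H6 (puzzle : List (List Int)) (out : Int) : Prop := out = H6_alt puzzle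
instance (puzzle : List (List Int)) (out : Int) : Decidable (Spec_H6 puzzle out) := by unfold Spec_H6; infer_instance

-- ===== CLAIM (what is proved, stated in full; the proofs are below) =====
def Claim_equal_H6 : Prop := ∀ (puzzle : List (List Int)), Dom_H6 puzzle → Spec_H6 puzzle (H6 puzzle)

-- ===== LEMMAS AND PROOFS =====

-- value of one adjacent pair in B's inner loop
def pairVal (p : List Int × List Int) : Int :=
  match p with
  | (x :: _, y :: _) => if x = y then 2 * x else 0
  | _ => 0

def rowScore (row : List (List Int)) : Int := ((row.zip row.tail).map pairVal).sum

-- value A adds when it compares cell a against an existing neighbour cell b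

-- A's per-index contribution (the two vertical offsets ±4 never pass the column check)
def bodyA (puzzle : List (List Int)) (i : Int) : Int :=
  tryA puzzle (PySem.List.pyGetD puzzle i []) i 1 +
  tryA puzzle (PySem.List.pyGetD puzzle i []) i (-1)

lemma tryA_four (p : List (List Int)) (c : List Int) (i : Int) : tryA p c i 4 = 0 := by
  have h := PySem.Int.mod_nonneg i (b := 4) (by norm_num)
  simp only [tryA]; rw [if_neg]; omega

lemma tryA_neg_four (p : List (List Int)) (c : List Int) (i : Int) : tryA p c i (-4) = 0 := by
  have h := PySem.Int.mod_lt i (b := 4) (by norm_num)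
  simp only [tryA]; rw [if_neg]; omega

lemma H6_eq_sum (p : List (List Int)) :
    H6 p = ((List.range p.length).map (fun k : Nat => bodyA p (k : Int))).sum := by
  unfold H6
  rw [PySem.List.pyRange_one, List.foldl_map]
  simp only [List.foldl_cons, List.foldl_nil, tryA_four, tryA_neg_four, add_zero, zero_add]
  have hfun : (fun (x : Int) (y : Nat) =>
        x + tryA p (PySem.List.pyGetD p (y:Int) []) ((y:Int)) 1
          + tryA p (PySem.List.pyGetD p (y:Int) []) ((y:Int)) (-1))
      = fun (x : Int) (y : Nat) => x + bodyA p (y : Int) := by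
    funext x y; simp [bodyA, add_assoc]
  rw [hfun, PySem.List.foldl_add]
  rw [show ((p.length : Int) - 0).toNat = p.length by omega, zero_add]

lemma inner_foldl (row : List (List Int)) (val : Int) :
    (row.zip row.tail).foldl
      (fun v p =>
        match p with
        | (x :: _, y :: _) => if x = y then v + 2 * x else v
        | _ => v)
      val = val + rowScore row := by
  have hfun : (fun (v : Int) (p : List Int × List Int) =>
      match p with
      | (x :: _, y :: _) => if x = y then v + 2 * x else v
      | _ => v) = fun v p => v + pairVal p := by
    funext v p
    rcases p with ⟨a, b⟩
    rcases a with _ | ⟨x, _⟩ <;> rcases b with _ | ⟨y, _⟩ <;> simp [pairVal]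
    split_ifs <;> omega
  rw [hfun, PySem.List.foldl_add]
  rfl

lemma H6_alt_eq_sum (p : List (List Int)) :
    H6_alt p = ((List.range ((p.length + 3) / 4)).map
      (fun k : Nat => rowScore ((p.drop (4 * k)).take 4))).sum := by
  unfold H6_alt
  simp only [inner_foldl]
  rw [PySem.List.pyRange_of_pos _ _ (by norm_num : (0:Int) < 4), List.foldl_map]
  rw [PySem.List.foldl_add]
  have hcnt : (if (0:Int) < (p.length : Int) then (((p.length : Int) - 0 + 4 - 1) / 4).toNat else 0)
      = (p.length + 3) / 4 := by
    rcases Nat.eq_zero_or_pos p.length with h | h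
    · simp [h]
    · rw [if_pos (by exact_mod_cast h)]
      rw [show ((p.length : Int) - 0 + 4 - 1) = ((p.length + 3 : Nat) : Int) by push_cast; ring]
      rw [show ((4:Int)) = ((4:Nat):Int) by norm_num, ← Int.natCast_div, Int.toNat_natCast]
  rw [hcnt, zero_add]
  congr 1
  apply List.map_congr_left
  intro k hk
  have : PySem.List.slice p (some (0 + 4 * (k:Int))) (some (0 + 4 * (k:Int) + 4))
      = (p.drop (4*k)).take 4 := by
    rw [show (0 + 4 * (k:Int)) = ((4*k : Nat) : Int) by push_cast; ring]
    rw [show (((4*k : Nat) : Int) + 4) = ((4*k : Nat) : Int) + ((4:Nat) : Int) by norm_num]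
    exact PySem.List.slice_natCast_add p (4*k) 4
  rw [this]

def tA (a b : List Int) : Int :=
  match a, b with
  | x :: _, y :: _ => if x = y then x else 0
  | _, _ => 0



lemma bodyA0 (a b c d : List Int) (rest : List (List Int)) :
    bodyA (a::b::c::d::rest) 0 = tA a b := by
  simp only [bodyA, tryA]
  norm_num [show PySem.Int.mod 0 4 = 0 from by decide, PySem.List.pyGet?_ofNat',
    PySem.List.pyGetD_ofNat', List.getElem?_cons_succ, List.getElem?_cons_zero]
  rcases a with _ | ⟨x, _⟩ <;> rcases b with _ | ⟨y, _⟩ <;> simp [tA]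
lemma bodyA1 (a b c d : List Int) (rest : List (List Int)) :
    bodyA (a::b::c::d::rest) 1 = tA b c + tA b a := by
  simp only [bodyA, tryA]
  norm_num [show PySem.Int.mod 1 4 = 1 from by decide, PySem.List.pyGet?_ofNat',
    PySem.List.pyGetD_ofNat', List.getElem?_cons_succ, List.getElem?_cons_zero]
  rcases a with _ | ⟨x, _⟩ <;> rcases b with _ | ⟨y, _⟩ <;> rcases c with _ | ⟨z, _⟩ <;> simp [tA]
lemma bodyA2 (a b c d : List Int) (rest : List (List Int)) :
    bodyA (a::b::c::d::rest) 2 = tA c d + tA c b := by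
  simp only [bodyA, tryA]
  norm_num [show PySem.Int.mod 2 4 = 2 from by decide, PySem.List.pyGet?_ofNat',
    PySem.List.pyGetD_ofNat', List.getElem?_cons_succ, List.getElem?_cons_zero]
  rcases b with _ | ⟨x, _⟩ <;> rcases c with _ | ⟨y, _⟩ <;> rcases d with _ | ⟨z, _⟩ <;> simp [tA]
lemma bodyA3 (a b c d : List Int) (rest : List (List Int)) :
    bodyA (a::b::c::d::rest) 3 = tA d c := by
  simp only [bodyA, tryA]
  norm_num [show PySem.Int.mod 3 4 = 3 from by decide, PySem.List.pyGet?_ofNat',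
    PySem.List.pyGetD_ofNat', List.getElem?_cons_succ, List.getElem?_cons_zero]
  rcases c with _ | ⟨x, _⟩ <;> rcases d with _ | ⟨y, _⟩ <;> simp [tA]

lemma mod4_shift (k : Nat) : PySem.Int.mod ((4 + k : Nat) : Int) 4 = PySem.Int.mod (k : Int) 4 := by
  rw [PySem.Int.mod_eq_emod_of_pos (by norm_num), PySem.Int.mod_eq_emod_of_pos (by norm_num)]
  push_cast
  omega

lemma mod4_cast (k : Nat) : PySem.Int.mod (k : Int) 4 = ((k % 4 : Nat) : Int) := by
  rw [PySem.Int.mod_eq_emod_of_pos (by norm_num)]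
  push_cast
  omega

lemma tryA_shift_one (a b c d cell : List Int) (rest : List (List Int)) (k : Nat) :
    tryA (a::b::c::d::rest) cell ((4 + k : Nat) : Int) 1 = tryA rest cell (k : Int) 1 := by
  simp only [tryA, mod4_shift]
  split_ifs with h
  · have h1 : ((4 + k : Nat) : Int) + 1 = ((4 + (k + 1) : Nat) : Int) := by push_cast; ring
    have h2 : ((k : Nat) : Int) + 1 = ((k + 1 : Nat) : Int) := by push_cast; ring
    rw [h1, h2, PySem.List.pyGet?_natCast, PySem.List.pyGet?_natCast]
    rw [show (4 + (k+1)) = (k+1) + 1 + 1 + 1 + 1 from by omega]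
    simp [List.getElem?_cons_succ]
  · rfl

lemma tryA_shift_neg_one (a b c d cell : List Int) (rest : List (List Int)) (k : Nat) :
    tryA (a::b::c::d::rest) cell ((4 + k : Nat) : Int) (-1) = tryA rest cell (k : Int) (-1) := by
  simp only [tryA, mod4_shift]
  split_ifs with h
  · have hk : 1 ≤ k % 4 := by
      rw [mod4_cast] at h
      exact_mod_cast (by omega : (1:Int) ≤ ((k % 4 : Nat) : Int))
    have hk1 : 1 ≤ k := by omega
    have h1 : ((4 + k : Nat) : Int) + (-1) = ((4 + (k - 1) : Nat) : Int) := by push_cast [hk1]; ring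
    have h2 : ((k : Nat) : Int) + (-1) = ((k - 1 : Nat) : Int) := by push_cast [hk1]; ring
    rw [h1, h2, PySem.List.pyGet?_natCast, PySem.List.pyGet?_natCast]
    rw [show (4 + (k-1)) = (k-1) + 1 + 1 + 1 + 1 from by omega]
    simp [List.getElem?_cons_succ]
  · rfl

lemma bodyA_shift (a b c d : List Int) (rest : List (List Int)) (k : Nat) :
    bodyA (a::b::c::d::rest) ((4 + k : Nat) : Int) = bodyA rest (k : Int) := by
  have hcell : PySem.List.pyGetD (a::b::c::d::rest) ((4 + k : Nat) : Int) [] =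
      PySem.List.pyGetD rest (k : Int) [] := by
    rw [PySem.List.pyGetD_natCast, PySem.List.pyGetD_natCast]
    rw [show (4 + k) = k + 1 + 1 + 1 + 1 from by omega]
    simp [List.getD]
  simp only [bodyA, hcell, tryA_shift_one, tryA_shift_neg_one]

lemma tA_add_tA (a b : List Int) : tA a b + tA b a = pairVal (a, b) := by
  rcases a with _ | ⟨x, _⟩ <;> rcases b with _ | ⟨y, _⟩ <;> simp [tA, pairVal]
  split_ifs with h h' h' <;> omega

lemma H6_step (a b c d : List Int) (rest : List (List Int)) :
    H6 (a::b::c::d::rest) = pairVal (a, b) + pairVal (b, c) + pairVal (c, d) + H6 rest := by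
  rw [H6_eq_sum, H6_eq_sum]
  rw [show (a::b::c::d::rest).length = 4 + rest.length from by simp; omega]
  rw [List.range_add, List.map_append, List.sum_append, List.map_map]
  rw [show List.range 4 = [0, 1, 2, 3] from by decide]
  have hshift : (List.range rest.length).map ((fun k : Nat => bodyA (a::b::c::d::rest) (k : Int)) ∘ (fun j => 4 + j))
      = (List.range rest.length).map (fun k : Nat => bodyA rest (k : Int)) := by
    apply List.map_congr_left
    intro k _
    simp only [Function.comp]
    exact bodyA_shift a b c d rest k
  rw [hshift]
  simp only [List.map_cons, List.map_nil, List.sum_cons, List.sum_nil]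
  norm_num [bodyA0, bodyA1, bodyA2, bodyA3]
  have h1 := tA_add_tA a b
  have h2 := tA_add_tA b c
  have h3 := tA_add_tA c d
  linarith

lemma H6_alt_step (a b c d : List Int) (rest : List (List Int)) :
    H6_alt (a::b::c::d::rest) = pairVal (a, b) + pairVal (b, c) + pairVal (c, d) + H6_alt rest := by
  rw [H6_alt_eq_sum, H6_alt_eq_sum]
  rw [show ((a::b::c::d::rest).length + 3) / 4 = 1 + (rest.length + 3) / 4 from by
    simp
    rw [show rest.length + 4 + 3 = (rest.length + 3) + 4 from by omega, Nat.add_div_right _ (by norm_num)]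
    omega]
  rw [List.range_add, List.map_append, List.sum_append, List.map_map]
  rw [show List.range 1 = [0] from by decide]
  have hshift : (List.range ((rest.length + 3) / 4)).map
        ((fun k : Nat => rowScore (((a::b::c::d::rest).drop (4 * k)).take 4)) ∘ (fun j => 1 + j))
      = (List.range ((rest.length + 3) / 4)).map (fun k : Nat => rowScore ((rest.drop (4 * k)).take 4)) := by
    apply List.map_congr_left
    intro k _
    simp only [Function.comp]
    rw [show 4 * (1 + k) = 4 + 4 * k from by ring]
    congr 1
    rw [← List.drop_drop]
    rfl
  rw [hshift]
  simp [rowScore]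
  ring

lemma case0 : H6 ([] : List (List Int)) = H6_alt [] := by
  rw [H6_eq_sum, H6_alt_eq_sum]; simp

lemma case1 (a : List Int) : H6 [a] = H6_alt [a] := by
  rw [H6_eq_sum, H6_alt_eq_sum]
  simp [rowScore, bodyA, tryA]

lemma case2 (a b : List Int) : H6 [a, b] = H6_alt [a, b] := by
  rw [H6_eq_sum, H6_alt_eq_sum]
  simp only [List.length_cons, List.length_nil]
  rw [show List.range (0+1+1) = [0, 1] from by decide, show (0+1+1+3)/4 = 1 from by norm_num,
    show List.range 1 = [0] from by decide]
  simp only [List.map_cons, List.map_nil, List.sum_cons, List.sum_nil, bodyA, tryA]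
  norm_num [show PySem.Int.mod 0 4 = 0 from by decide, show PySem.Int.mod 1 4 = 1 from by decide,
    PySem.List.pyGet?_ofNat', PySem.List.pyGetD_ofNat', rowScore]
  rcases a with _ | ⟨x, _⟩ <;> rcases b with _ | ⟨y, _⟩ <;> simp [pairVal]
  split_ifs <;> omega

lemma case3 (a b c : List Int) : H6 [a, b, c] = H6_alt [a, b, c] := by
  rw [H6_eq_sum, H6_alt_eq_sum]
  simp only [List.length_cons, List.length_nil]
  rw [show List.range (0+1+1+1) = [0, 1, 2] from by decide, show (0+1+1+1+3)/4 = 1 from by norm_num,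
    show List.range 1 = [0] from by decide]
  simp only [List.map_cons, List.map_nil, List.sum_cons, List.sum_nil, bodyA, tryA]
  norm_num [show PySem.Int.mod 0 4 = 0 from by decide, show PySem.Int.mod 1 4 = 1 from by decide,
    show PySem.Int.mod 2 4 = 2 from by decide,
    PySem.List.pyGet?_ofNat', PySem.List.pyGetD_ofNat', rowScore]
  rcases a with _ | ⟨x, _⟩ <;> rcases b with _ | ⟨y, _⟩ <;> rcases c with _ | ⟨z, _⟩ <;>
    simp [pairVal] <;> split_ifs <;> omega

theorem main_eq : ∀ (p : List (List Int)), H6 p = H6_alt p := by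
  have key : ∀ (n : Nat) (p : List (List Int)), p.length ≤ n → H6 p = H6_alt p := by
    intro n
    induction n with
    | zero =>
      intro p h
      have : p = [] := List.length_eq_zero_iff.mp (Nat.le_zero.mp h)
      rw [this]; exact case0
    | succ n ih =>
      intro p h
      match p with
      | [] => exact case0
      | [a] => exact case1 a
      | [a, b] => exact case2 a b
      | [a, b, c] => exact case3 a b c
      | a :: b :: c :: d :: rest =>
        rw [H6_step, H6_alt_step, ih rest (by simp at h; omega)]
  exact fun p => key p.length p le_rfl

-- ===== VERDICT (by name: the statement is the Claim_ definition above) =====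
theorem H6_spec : Claim_equal_H6 := by
  intro p _
  unfold Spec_H6
  exact main_eq p
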